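-- pv_equiv track=rewrite | github.com/athenahz01/athena-agents | moana/services/weather.py | _get_outfit_tip
-- ===== SOURCE A (Python) =====
-- def _get_outfit_tip(temp: int, description: str) -> str:
--     """Outfit suggestion based on weather."""
--     desc = description.lower()
--     rain = any(w in desc for w in ["rain", "drizzle", "shower", "thunder"])
--     snow = any(w in desc for w in ["snow", "sleet", "blizzard"])
--
--     if temp >= 80:
--         base = "Sundress or linen set day ☀️"
--     elif temp >= 70:
--         base = "Light layers — cute top + light jacket for evening"
--     elif temp >= 55:
--         base = "Sweater weather! Layer up, maybe a cardigan"
--     elif temp >= 40: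
--         base = "Coat + boots situation. Scarf would be cute"
--     elif temp >= 25:
--         base = "Bundle up! Heavy coat, gloves, the whole thing 🧤"
--     else:
--         base = "STAY WARM. Puffer coat, layers, everything 🥶"
--
--     if rain:
--         base += " + umbrella! ☂️"
--     elif snow:
--         base += " + waterproof boots, watch for ice 🌨️"
--
--     return base
-- ===== SOURCE B (Python) =====
-- _THRESHOLDS = (25, 40, 55, 70, 80)  # ascending; index = how many thresholds temp reaches
--
-- _MESSAGES = (  # coldest .. hottest, indexed by that count
--     "STAY WARM. Puffer coat, layers, everything \U0001f976",
--     "Bundle up! Heavy coat, gloves, the whole thing \U0001f9e4",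
--     "Coat + boots situation. Scarf would be cute",
--     "Sweater weather! Layer up, maybe a cardigan",
--     "Light layers \u2014 cute top + light jacket for evening",
--     "Sundress or linen set day \u2600\ufe0f",
-- )
--
-- _KEYWORD_SUFFIX = (  # rain keywords first so rain outranks snow, like the original elif
--     ("rain", " + umbrella! \u2602\ufe0f"),
--     ("drizzle", " + umbrella! \u2602\ufe0f"),
--     ("shower", " + umbrella! \u2602\ufe0f"),
--     ("thunder", " + umbrella! \u2602\ufe0f"),
--     ("snow", " + waterproof boots, watch for ice \U0001f328\ufe0f"),
--     ("sleet", " + waterproof boots, watch for ice \U0001f328\ufe0f"),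
--     ("blizzard", " + waterproof boots, watch for ice \U0001f328\ufe0f"),
-- )
--
--
-- def _get_outfit_tip(temp: int, description: str) -> str:
--     desc = description.lower()
--     idx = sum(t <= temp for t in _THRESHOLDS)
--     suffix = next((sfx for word, sfx in _KEYWORD_SUFFIX if word in desc), "")
--     return _MESSAGES[idx] + suffix
-- ===== Notes on version B (the rewrite author's own statement) =====
-- stated objective: alternative
-- what changed: B replaces A's if/elif ladder and boolean any()-flags by arithmetic: the message index is computed by counting how many ascending thresholds temp reaches (sum of comparisons) and the suffix is the first match in a single ordered keyword->suffix table scanned once.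
import Mathlib
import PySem

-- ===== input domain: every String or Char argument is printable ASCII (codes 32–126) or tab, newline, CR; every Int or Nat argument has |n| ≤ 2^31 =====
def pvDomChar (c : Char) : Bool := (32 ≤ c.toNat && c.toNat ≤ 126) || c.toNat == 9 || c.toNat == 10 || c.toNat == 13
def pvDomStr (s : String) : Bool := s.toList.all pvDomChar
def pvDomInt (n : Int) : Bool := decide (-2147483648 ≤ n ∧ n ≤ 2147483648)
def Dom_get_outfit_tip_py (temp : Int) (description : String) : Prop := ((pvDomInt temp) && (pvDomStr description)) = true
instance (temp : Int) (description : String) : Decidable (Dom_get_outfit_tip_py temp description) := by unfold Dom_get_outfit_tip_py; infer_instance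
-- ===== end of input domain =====

-- B computes the message index arithmetically (count of thresholds reached) and the suffix by a
-- first-match scan of one ordered keyword table, instead of A's if/elif ladder + any() flags
-- (objective: alternative; same cost).

-- ===== PORT A =====
def get_outfit_tip_py (temp : Int) (description : String) : String :=
  let desc := PySem.Str.lower description
  let rain := ["rain", "drizzle", "shower", "thunder"].any (fun w => PySem.Str.isIn w desc)
  let snow := ["snow", "sleet", "blizzard"].any (fun w => PySem.Str.isIn w desc)
  let base :=
    if temp ≥ 80 then "Sundress or linen set day ☀️"
    else if temp ≥ 70 then "Light layers — cute top + light jacket for evening"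
    else if temp ≥ 55 then "Sweater weather! Layer up, maybe a cardigan"
    else if temp ≥ 40 then "Coat + boots situation. Scarf would be cute"
    else if temp ≥ 25 then "Bundle up! Heavy coat, gloves, the whole thing 🧤"
    else "STAY WARM. Puffer coat, layers, everything 🥶"
  let base := if rain then base ++ " + umbrella! ☂️"
              else if snow then base ++ " + waterproof boots, watch for ice 🌨️"
              else base
  base

-- ===== PORT B =====
def pvThresholds : List Int := [25, 40, 55, 70, 80]

def pvMessages : List String :=
  ["STAY WARM. Puffer coat, layers, everything 🥶",
   "Bundle up! Heavy coat, gloves, the whole thing 🧤",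
   "Coat + boots situation. Scarf would be cute",
   "Sweater weather! Layer up, maybe a cardigan",
   "Light layers — cute top + light jacket for evening",
   "Sundress or linen set day ☀️"]

def pvKeywordSuffix : List (String × String) :=
  [("rain", " + umbrella! ☂️"),
   ("drizzle", " + umbrella! ☂️"),
   ("shower", " + umbrella! ☂️"),
   ("thunder", " + umbrella! ☂️"),
   ("snow", " + waterproof boots, watch for ice 🌨️"),
   ("sleet", " + waterproof boots, watch for ice 🌨️"),
   ("blizzard", " + waterproof boots, watch for ice 🌨️")]

-- next((sfx for word, sfx in table if word in desc), "")
def pvFirstSuffix (desc : String) : List (String × String) → String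
  | [] => ""
  | (w, s) :: rest => if PySem.Str.isIn w desc then s else pvFirstSuffix desc rest

def get_outfit_tip_py_alt (temp : Int) (description : String) : String :=
  let desc := PySem.Str.lower description
  -- sum(t <= temp for t in _THRESHOLDS): count of thresholds reached
  let idx := pvThresholds.countP (fun t => t ≤ temp)
  let suffix := pvFirstSuffix desc pvKeywordSuffix
  -- _MESSAGES[idx]: idx is always in range 0..5, so getD is exact
  pvMessages.getD idx "" ++ suffix

-- ===== PRECONDITION & SPEC =====
def Spec_get_outfit_tip_py (temp : Int) (description : String) (out : String) : Prop := out = get_outfit_tip_py_alt temp description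
instance (temp : Int) (description : String) (out : String) : Decidable (Spec_get_outfit_tip_py temp description out) := by unfold Spec_get_outfit_tip_py; infer_instance

-- ===== CLAIM (what is proved, stated in full; the proofs are below) =====
def Claim_equal_get_outfit_tip_py : Prop := ∀ (temp : Int) (description : String), Dom_get_outfit_tip_py temp description → Spec_get_outfit_tip_py temp description (get_outfit_tip_py temp description)

-- ===== LEMMAS AND PROOFS =====

-- A's tail: mutating base via if/elif equals appending a separately chosen suffix.
theorem pv_append_suffix (b u v : String) (r s : Bool) :
    (if r then b ++ u else if s then b ++ v else b) =
      b ++ (if r then u else if s then v else "") := by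
  cases r <;> cases s <;> simp

-- First-match over the 7-row keyword table equals the rain-before-snow elif on the any() flags.
theorem pv_first_suffix_eq (desc : String) :
    pvFirstSuffix desc pvKeywordSuffix =
      (if ["rain", "drizzle", "shower", "thunder"].any (fun w => PySem.Str.isIn w desc) then
        " + umbrella! ☂️"
      else if ["snow", "sleet", "blizzard"].any (fun w => PySem.Str.isIn w desc) then
        " + waterproof boots, watch for ice 🌨️"
      else "") := by
  simp only [pvKeywordSuffix, pvFirstSuffix, List.any_cons, List.any_nil, Bool.or_false]
  cases PySem.Str.isIn "rain" desc <;> cases PySem.Str.isIn "drizzle" desc <;>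
    cases PySem.Str.isIn "shower" desc <;> cases PySem.Str.isIn "thunder" desc <;>
    cases PySem.Str.isIn "snow" desc <;> cases PySem.Str.isIn "sleet" desc <;>
    cases PySem.Str.isIn "blizzard" desc <;> simp

-- Counting reached thresholds indexes the same message the ladder selects.
theorem pv_base_eq (temp : Int) :
    pvMessages.getD (pvThresholds.countP (fun t => t ≤ temp)) "" =
      (if temp ≥ 80 then "Sundress or linen set day ☀️"
      else if temp ≥ 70 then "Light layers — cute top + light jacket for evening"
      else if temp ≥ 55 then "Sweater weather! Layer up, maybe a cardigan"
      else if temp ≥ 40 then "Coat + boots situation. Scarf would be cute"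
      else if temp ≥ 25 then "Bundle up! Heavy coat, gloves, the whole thing 🧤"
      else "STAY WARM. Puffer coat, layers, everything 🥶") := by
  simp only [pvThresholds, List.countP_cons, List.countP_nil, decide_eq_true_eq]
  split_ifs <;> simp_all <;> first | rfl | omega

-- ===== VERDICT (by name: the statement is the Claim_ definition above) =====
theorem get_outfit_tip_py_spec : Claim_equal_get_outfit_tip_py := by
  intro temp description _
  unfold Spec_get_outfit_tip_py get_outfit_tip_py get_outfit_tip_py_alt
  simp only [pv_append_suffix, pv_first_suffix_eq, pv_base_eq]
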